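-- pv_equiv track=rewrite | github.com/MarkMilhar/pdl | pdl.py | combine_incomplete_directives
-- ===== SOURCE A (Python) =====
-- def combine_incomplete_directives(lines):
--     """Combines lines with incomplete directives."""
--     combined_lines = []
--     in_directive = False
--     current_directive = ""
--     for line in lines:
--         if line.startswith("#") and "{" in line:
--              in_directive = True
--
--         if in_directive:
--             current_directive += line + " "
--
--             if "}" in current_directive:
--                 in_directive = False
--                 combined_lines.append(current_directive)
--                 current_directive = ""
--
--         else:
--             combined_lines.append(line)
--
--     if current_directive:
--         combined_lines.append(current_directive)
--
--     return combined_lines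
-- ===== SOURCE B (Python) =====
-- def combine_incomplete_directives(lines):
--     """Combines lines with incomplete directives."""
--     result = []
--     i = 0
--     n = len(lines)
--     while i < n:
--         line = lines[i]
--         if line.startswith("#") and "{" in line:
--             cur = ""
--             while i < n:
--                 cur += lines[i] + " "
--                 i += 1
--                 if "}" in cur:
--                     break
--             result.append(cur)
--         else:
--             result.append(line)
--             i += 1
--     return result
-- ===== Notes on version B (the rewrite author's own statement) =====
-- stated objective: alternative
-- what changed: Replaced A's single pass with an in_directive boolean flag and cross-iteration accumulator state by an index-based outer loop with an explicit nested inner loop that gathers a whole directive block and flushes it (including an unclosed trailing block) when it ends.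
import Mathlib
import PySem

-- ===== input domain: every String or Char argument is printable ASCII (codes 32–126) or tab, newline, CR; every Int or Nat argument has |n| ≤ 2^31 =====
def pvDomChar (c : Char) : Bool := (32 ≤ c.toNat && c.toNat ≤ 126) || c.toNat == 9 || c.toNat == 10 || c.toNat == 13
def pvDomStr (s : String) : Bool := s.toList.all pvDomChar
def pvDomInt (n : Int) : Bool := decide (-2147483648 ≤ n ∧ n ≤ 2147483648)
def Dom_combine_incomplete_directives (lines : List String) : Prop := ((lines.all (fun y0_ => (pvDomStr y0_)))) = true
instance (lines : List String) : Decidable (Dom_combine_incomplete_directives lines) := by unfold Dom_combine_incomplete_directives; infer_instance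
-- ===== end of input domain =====

-- B replaces A's boolean in_directive state machine with explicit nested iteration (an
-- inner loop that gathers a directive block); same O(n) behaviour, objective: alternative.

-- ===== PORT A =====
-- one step of A's for-loop over state (combined_lines, in_directive, current_directive)
def pvAStep (st : List String × Bool × String) (line : String) : List String × Bool × String :=
  let acc := st.1
  let inDir := st.2.1
  let cur := st.2.2
  let inDir := if PySem.Str.startswith line "#" && PySem.Str.isIn "{" line then true else inDir
  if inDir then
    let cur := cur ++ line ++ " "
    if PySem.Str.isIn "}" cur then (acc ++ [cur], false, "") else (acc, true, cur)
  else
    (acc ++ [line], inDir, cur)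

def combine_incomplete_directives (lines : List String) : List String :=
  let st := lines.foldl pvAStep ([], false, "")
  if st.2.2 == "" then st.1 else st.1 ++ [st.2.2]

-- ===== PORT B =====
-- B's inner while loop: accumulate lines into cur until '}' appears in cur (or input runs out);
-- returns (cur, remaining lines)
def pvGather : List String → String → String × List String
  | [], cur => (cur, [])
  | l :: rest, cur =>
    let cur := cur ++ l ++ " "
    if PySem.Str.isIn "}" cur then (cur, rest) else pvGather rest cur

-- the inner loop consumes at least the head line (cited by B's termination proof)
theorem pvGather_len : ∀ (ls : List String) (cur : String), (pvGather ls cur).2.length ≤ ls.length := by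
  intro ls
  induction ls with
  | nil => intro cur; simp [pvGather]
  | cons l rest ih =>
    intro cur
    simp only [pvGather]
    split
    · simp
    · exact Nat.le_succ_of_le (ih _)

theorem pvGather_len_cons (l : String) (rest : List String) (cur : String) :
    (pvGather (l :: rest) cur).2.length ≤ rest.length := by
  simp only [pvGather]
  split
  · simp
  · exact pvGather_len rest _

-- B's outer while loop over the remaining lines
def combine_incomplete_directives_alt : List String → List String
  | [] => []
  | l :: rest =>
    if PySem.Str.startswith l "#" && PySem.Str.isIn "{" l then
      let p := pvGather (l :: rest) ""
      p.1 :: combine_incomplete_directives_alt p.2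
    else
      l :: combine_incomplete_directives_alt rest
termination_by ls => ls.length
decreasing_by
  · exact Nat.lt_succ_of_le (pvGather_len_cons l rest "")
  · simp

-- ===== PRECONDITION & SPEC =====
def Spec_combine_incomplete_directives (lines : List String) (out : List String) : Prop := out = combine_incomplete_directives_alt lines
instance (lines : List String) (out : List String) : Decidable (Spec_combine_incomplete_directives lines out) := by unfold Spec_combine_incomplete_directives; infer_instance

-- ===== CLAIM (what is proved, stated in full; the proofs are below) =====
def Claim_equal_combine_incomplete_directives : Prop := ∀ (lines : List String), Dom_combine_incomplete_directives lines → Spec_combine_incomplete_directives lines (combine_incomplete_directives lines)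

-- ===== LEMMAS AND PROOFS =====

-- finish of A's loop state, as A computes it after the for-loop
def pvAFinish (st : List String × Bool × String) : List String :=
  if st.2.2 == "" then st.1 else st.1 ++ [st.2.2]

theorem pvAppend_space_ne_empty (s l : String) : s ++ l ++ " " ≠ "" := by
  intro h
  have := congrArg String.length h
  simp [String.length_append] at this

-- joint invariant: A's remaining run from a non-directive state is acc ++ B's run,
-- and from an in-directive state (nonempty cur) it is acc ++ one gathered block ++ B's run
theorem pvMain : ∀ (n : ℕ) (ls : List String), ls.length ≤ n →
    (∀ acc, pvAFinish (ls.foldl pvAStep (acc, false, "")) =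
        acc ++ combine_incomplete_directives_alt ls) ∧
    (∀ acc cur, cur ≠ "" →
      pvAFinish (ls.foldl pvAStep (acc, true, cur)) =
        acc ++ (pvGather ls cur).1 :: combine_incomplete_directives_alt (pvGather ls cur).2) := by
  intro n
  induction n with
  | zero =>
    intro ls h
    have : ls = [] := List.length_eq_zero_iff.mp (Nat.le_zero.mp h)
    subst this
    constructor
    · intro acc; simp [pvAFinish, combine_incomplete_directives_alt]
    · intro acc cur hcur
      simp only [List.foldl_nil, pvAFinish, pvGather, combine_incomplete_directives_alt]
      rw [if_neg (by simpa using hcur)]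
  | succ n ih =>
    intro ls h
    cases ls with
    | nil =>
      constructor
      · intro acc; simp [pvAFinish, combine_incomplete_directives_alt]
      · intro acc cur hcur
        simp only [List.foldl_nil, pvAFinish, pvGather, combine_incomplete_directives_alt]
        rw [if_neg (by simpa using hcur)]
    | cons l rest =>
      have hr : rest.length ≤ n := by simpa using h
      constructor
      · -- non-directive state
        intro acc
        simp only [List.foldl_cons]
        by_cases hd : (PySem.Str.startswith l "#" && PySem.Str.isIn "{" l) = true
        · -- enters directive mode: A does one gather step itself
          simp only [pvAStep, hd, if_true]
          rw [combine_incomplete_directives_alt]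
          simp only [hd, if_true]
          simp only [pvGather]
          by_cases hc : PySem.Str.isIn "}" ("" ++ l ++ " ") = true
          · simp only [hc, if_true]
            rw [(ih rest hr).1 (acc ++ [("" ++ l ++ " ")])]
            simp
          · simp only [hc]
            simp only [Bool.false_eq_true, if_false]
            exact (ih rest hr).2 acc ("" ++ l ++ " ") (pvAppend_space_ne_empty "" l)
        · -- plain line
          simp only [pvAStep, hd]
          simp only [Bool.false_eq_true, if_false]
          rw [combine_incomplete_directives_alt]
          simp only [hd, Bool.false_eq_true, if_false]
          rw [(ih rest hr).1 (acc ++ [l])]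
          simp
      · -- in-directive state: the startswith test cannot change inDir (already true)
        intro acc cur hcur
        simp only [List.foldl_cons, pvAStep]
        have hst : (if PySem.Str.startswith l "#" && PySem.Str.isIn "{" l then true else true) = true := by
          split <;> rfl
        simp only [hst, if_true]
        simp only [pvGather]
        by_cases hc : PySem.Str.isIn "}" (cur ++ l ++ " ") = true
        · simp only [hc, if_true]
          rw [(ih rest hr).1 (acc ++ [(cur ++ l ++ " ")])]
          simp
        · simp only [hc, Bool.false_eq_true, if_false]
          exact (ih rest hr).2 acc (cur ++ l ++ " ") (pvAppend_space_ne_empty cur l)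

-- ===== VERDICT (by name: the statement is the Claim_ definition above) =====
theorem combine_incomplete_directives_spec : Claim_equal_combine_incomplete_directives := by
  intro lines _
  unfold Spec_combine_incomplete_directives combine_incomplete_directives
  have := (pvMain lines.length lines le_rfl).1 []
  simpa [pvAFinish] using this
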